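-- pv_equiv track=rewrite | github.com/xnetvn-com/xnetvn_monitord | src/xnetvn_monitord/utils/update_checker.py | _compare_prerelease
-- ===== SOURCE A (Python) =====
-- from typing import Dict, List, Optional, Tuple
--
-- def _compare_prerelease(left: List[str], right: List[str]) -> int:
--     """Compare prerelease identifiers following SemVer rules.
--
--     Args:
--         left: Left prerelease identifiers.
--         right: Right prerelease identifiers.
--
--     Returns:
--         -1 if left < right, 0 if equal, 1 if left > right.
--     """
--     for left_part, right_part in zip(left, right):
--         left_is_num = left_part.isdigit()
--         right_is_num = right_part.isdigit()
--
--         if left_is_num and right_is_num: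
--             left_val = int(left_part)
--             right_val = int(right_part)
--             if left_val != right_val:
--                 return -1 if left_val < right_val else 1
--         elif left_is_num != right_is_num:
--             return -1 if left_is_num else 1
--         else:
--             if left_part != right_part:
--                 return -1 if left_part < right_part else 1
--
--     if len(left) != len(right):
--         return -1 if len(left) < len(right) else 1
--     return 0
-- ===== SOURCE B (Python) =====
-- from typing import List
--
--
-- def _compare_prerelease(left: List[str], right: List[str]) -> int:
--     """Compare prerelease identifiers following SemVer rules.
--
--     Different decomposition: map each identifier to a comparison key
--     ((0, int) for numeric, (1, str) for alphanumeric) and compare the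
--     two key lists with Python's built-in list ordering.
--     """
--     key = lambda p: (0, int(p)) if p.isdigit() else (1, p)
--     lk = [key(p) for p in left]
--     rk = [key(p) for p in right]
--     if lk < rk:
--         return -1
--     if lk > rk:
--         return 1
--     return 0
-- ===== Notes on version B (the rewrite author's own statement) =====
-- stated objective: simpler
-- what changed: Replaces the element-by-element branch ladder plus trailing length comparison with a key-transform (numeric identifiers tagged below alphanumeric ones) followed by a single built-in lexicographic list comparison.
import Mathlib
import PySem

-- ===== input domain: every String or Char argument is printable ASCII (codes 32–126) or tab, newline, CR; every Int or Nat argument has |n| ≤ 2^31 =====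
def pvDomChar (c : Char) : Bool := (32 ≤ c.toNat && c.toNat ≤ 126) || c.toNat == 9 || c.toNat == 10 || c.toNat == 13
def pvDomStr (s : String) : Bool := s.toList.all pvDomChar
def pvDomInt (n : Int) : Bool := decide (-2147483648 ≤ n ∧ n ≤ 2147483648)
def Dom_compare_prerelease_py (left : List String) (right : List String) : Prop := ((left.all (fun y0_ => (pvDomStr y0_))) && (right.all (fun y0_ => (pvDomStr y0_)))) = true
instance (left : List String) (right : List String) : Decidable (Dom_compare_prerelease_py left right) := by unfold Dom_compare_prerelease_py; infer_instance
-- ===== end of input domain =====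

-- B replaces A's in-loop branch ladder + trailing length comparison by a key transform
-- followed by one lexicographic list comparison (objective: simpler decomposition).

-- ===== PORT A =====
-- the zip loop of A; llen/rlen are len(left), len(right), used only after the loop.
-- int(p) is (PySem.Int.ofStr? p).getD 0: exact here because it is only evaluated under
-- p.isdigit(), where int(p) always succeeds on the ASCII domain.
def pvGoA (llen rlen : Int) : List (String × String) → Int
  | [] => if llen ≠ rlen then (if llen < rlen then -1 else 1) else 0
  | (lp, rp) :: rest =>
    let lin := PySem.Str.strIsdigit lp
    let rin := PySem.Str.strIsdigit rp
    if lin && rin then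
      let lv := (PySem.Int.ofStr? lp).getD 0
      let rv := (PySem.Int.ofStr? rp).getD 0
      if lv ≠ rv then (if lv < rv then -1 else 1) else pvGoA llen rlen rest
    else if lin ≠ rin then (if lin then -1 else 1)
    else if lp ≠ rp then (if lp < rp then -1 else 1)
    else pvGoA llen rlen rest

def compare_prerelease_py (left : List String) (right : List String) : Int :=
  pvGoA (left.length : Int) (right.length : Int) (left.zip right)

-- ===== PORT B =====
-- comparison key: Python's (0, int(p)) / (1, p) tuple, as a sum type
inductive PvKey
  | num : Int → PvKey
  | strk : String → PvKey
deriving DecidableEq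

def pvKeyLt : PvKey → PvKey → Bool
  | .num a, .num b => decide (a < b)
  | .num _, .strk _ => true
  | .strk _, .num _ => false
  | .strk a, .strk b => decide (a < b)

-- Python's built-in '<' on lists of keys (lexicographic; shorter strict prefix is smaller)
def pvKeyListLt : List PvKey → List PvKey → Bool
  | _, [] => false
  | [], _ :: _ => true
  | a :: as, b :: bs => if pvKeyLt a b then true else if a ≠ b then false else pvKeyListLt as bs

def pvKey (p : String) : PvKey :=
  if PySem.Str.strIsdigit p then .num ((PySem.Int.ofStr? p).getD 0) else .strk p

def compare_prerelease_py_alt (left : List String) (right : List String) : Int :=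
  let lk := left.map pvKey
  let rk := right.map pvKey
  if pvKeyListLt lk rk then -1 else if pvKeyListLt rk lk then 1 else 0

-- ===== PRECONDITION & SPEC =====
def Spec_compare_prerelease_py (left : List String) (right : List String) (out : Int) : Prop := out = compare_prerelease_py_alt left right
instance (left : List String) (right : List String) (out : Int) : Decidable (Spec_compare_prerelease_py left right out) := by unfold Spec_compare_prerelease_py; infer_instance

-- ===== CLAIM (what is proved, stated in full; the proofs are below) =====
def Claim_equal_compare_prerelease_py : Prop := ∀ (left : List String) (right : List String), Dom_compare_prerelease_py left right → Spec_compare_prerelease_py left right (compare_prerelease_py left right)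

-- ===== LEMMAS AND PROOFS =====

-- pvGoA only uses llen/rlen in its base case, and only through their order
theorem pvGoA_succ (ps : List (String × String)) (llen rlen : Int) :
    pvGoA (llen + 1) (rlen + 1) ps = pvGoA llen rlen ps := by
  induction ps with
  | nil => simp only [pvGoA]; split_ifs <;> omega
  | cons p rest ih =>
    obtain ⟨lp, rp⟩ := p
    simp only [pvGoA, ih]

theorem pvMain (l : List String) : ∀ r : List String,
    pvGoA (l.length : Int) (r.length : Int) (l.zip r) = compare_prerelease_py_alt l r := by
  induction l with
  | nil =>
    intro r
    cases r with
    | nil => simp [pvGoA, compare_prerelease_py_alt, pvKeyListLt]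
    | cons b rs =>
      simp [pvGoA, compare_prerelease_py_alt, pvKeyListLt]
      omega
  | cons a ls ih =>
    intro r
    cases r with
    | nil =>
      simp [pvGoA, compare_prerelease_py_alt, pvKeyListLt]
      omega
    | cons b rs =>
      have hrec : pvGoA ((ls.length : Int) + 1) ((rs.length : Int) + 1) (ls.zip rs)
          = compare_prerelease_py_alt ls rs := by
        rw [pvGoA_succ]; exact ih rs
      simp only [List.zip_cons_cons, List.length_cons]
      push_cast
      by_cases hla : PySem.Chars.strIsdigit a.toList = true <;>
        by_cases hrb : PySem.Chars.strIsdigit b.toList = true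
      · -- both numeric
        rcases lt_trichotomy ((PySem.Int.ofStr? a).getD 0) ((PySem.Int.ofStr? b).getD 0)
          with h | h | h
        · simp [pvGoA, compare_prerelease_py_alt, pvKeyListLt, pvKey, pvKeyLt, hla, hrb,
            h, h.ne]
        · simp only [compare_prerelease_py_alt] at hrec
          simp [pvGoA, compare_prerelease_py_alt, pvKeyListLt, pvKey, pvKeyLt, hla, hrb, h, hrec]
        · simp [pvGoA, compare_prerelease_py_alt, pvKeyListLt, pvKey, pvKeyLt, hla, hrb,
            h, h.ne', asymm h]
      · -- left numeric, right alphanumeric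
        simp [pvGoA, compare_prerelease_py_alt, pvKeyListLt, pvKey, pvKeyLt, hla, hrb]
      · -- left alphanumeric, right numeric
        simp [pvGoA, compare_prerelease_py_alt, pvKeyListLt, pvKey, pvKeyLt, hla, hrb]
      · -- both alphanumeric
        rcases lt_trichotomy a.toList b.toList with h | h | h
        · have hab : a ≠ b := fun e => h.ne (by rw [e])
          simp [pvGoA, compare_prerelease_py_alt, pvKeyListLt, pvKey, pvKeyLt, hla, hrb,
            h, hab]
        · have hab : a = b := by
            have h2 := congrArg String.ofList h
            rwa [String.ofList_toList, String.ofList_toList] at h2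
          subst hab
          simp only [compare_prerelease_py_alt] at hrec
          simp [pvGoA, compare_prerelease_py_alt, pvKeyListLt, pvKey, pvKeyLt, hla, hrec]
        · have hab : a ≠ b := fun e => h.ne (by rw [e])
          simp [pvGoA, compare_prerelease_py_alt, pvKeyListLt, pvKey, pvKeyLt, hla, hrb,
            h, hab, Ne.symm hab, asymm h]

-- ===== VERDICT (by name: the statement is the Claim_ definition above) =====
theorem compare_prerelease_py_spec : Claim_equal_compare_prerelease_py := by
  intro left right _
  unfold Spec_compare_prerelease_py compare_prerelease_py
  exact pvMain left right
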